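-- pv_equiv track=rewrite | github.com/SeanECurrie/MaiaLearningResearch | archive/legacy-scripts/project-scripts-pre-normalization/filter_phase3_top4.py | filter_markdown_table
-- ===== SOURCE A (Python) =====
-- def filter_markdown_table(content):
--     """
--     Filter markdown tables to remove Cialfo, MajorClarity, and Common App columns.
--     """
--     lines = content.split('\n')
--     result = []
--     in_table = False
--     header_indices = None
--
--     for i, line in enumerate(lines):
--         # Detect table start
--         if line.strip().startswith('|') and not in_table:
--             in_table = True
--             # Parse header to find which columns to keep
--             cells = [cell.strip() for cell in line.split('|')]
--             cells = [c for c in cells if c]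
--
--             # Find indices of columns to keep
--             keep_columns = []
--             header_indices = []
--             for idx, cell in enumerate(cells):
--                 cell_lower = cell.lower().strip('*').strip()
--                 if cell_lower not in ['cialfo', 'majorclarity', 'common app']:
--                     keep_columns.append(cell)
--                     header_indices.append(idx)
--
--             result.append('| ' + ' | '.join(keep_columns) + ' |')
--             continue
--
--         # Process table rows
--         if in_table and line.strip().startswith('|'):
--             cells = [cell.strip() for cell in line.split('|')]
--             cells = [c for c in cells if c]
--
--             # Check if separator row
--             if all(c == '' or all(ch in '-: ' for ch in c) for c in cells):
--                 result.append('| ' + ' | '.join(['---'] * len(header_indices)) + ' |')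
--             else:
--                 # Filter data row
--                 filtered_cells = [cells[i] for i in header_indices if i < len(cells)]
--                 result.append('| ' + ' | '.join(filtered_cells) + ' |')
--             continue
--
--         # Exit table
--         if in_table and not line.strip().startswith('|'):
--             in_table = False
--             header_indices = None
--
--         result.append(line)
--
--     return '\n'.join(result)
-- ===== SOURCE B (Python) =====
-- def _is_table_line(line):
--     return line.strip().startswith('|')
--
--
-- def _cells(line):
--     return [c for c in (p.strip() for p in line.split('|')) if c]
--
--
-- def _render(cs):
--     return '| ' + ' | '.join(cs) + ' |'
--
--
-- def _header(cells):
--     keep, idxs = [], []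
--     for k, cell in enumerate(cells):
--         if cell.lower().strip('*').strip() not in ('cialfo', 'majorclarity', 'common app'):
--             keep.append(cell)
--             idxs.append(k)
--     return keep, idxs
--
--
-- def _row(idxs, line):
--     cells = _cells(line)
--     if all(all(ch in '-: ' for ch in c) for c in cells):
--         return _render(['---'] * len(idxs))
--     return _render([cells[k] for k in idxs if k < len(cells)])
--
--
-- def _render_block(block):
--     if not block:
--         return []
--     keep, idxs = _header(_cells(block[0]))
--     return [_render(keep)] + [_row(idxs, r) for r in block[1:]]
--
--
-- def filter_markdown_table(content):
--     """
--     Filter markdown tables to remove Cialfo, MajorClarity, and Common App columns.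
--
--     Built back-to-front: walk the lines in reverse, collecting the current table
--     block in `pending`; a table block is rendered only once its first line has
--     been reached, so no parsed-header state is ever carried forward.
--     """
--     pending = []   # the table block just below the current position, front-to-back
--     chunks = []    # finished output chunks, back-to-front
--     for line in reversed(content.split('\n')):
--         if _is_table_line(line):
--             pending = [line] + pending
--         else:
--             chunks.append(_render_block(pending))
--             chunks.append([line])
--             pending = []
--     chunks.append(_render_block(pending))
--     return '\n'.join(line for chunk in reversed(chunks) for line in chunk)
-- ===== Notes on version B (the rewrite author's own statement) =====
-- stated objective: alternative
-- what changed: Replaces A's forward state machine (in_table flag plus parsed header_indices carried across iterations) with a back-to-front construction: walk the lines in reverse collecting each table block as pending raw lines, render a whole block only when its first (header) line is reached, and assemble the output from the reversed chunks.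
import Mathlib
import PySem

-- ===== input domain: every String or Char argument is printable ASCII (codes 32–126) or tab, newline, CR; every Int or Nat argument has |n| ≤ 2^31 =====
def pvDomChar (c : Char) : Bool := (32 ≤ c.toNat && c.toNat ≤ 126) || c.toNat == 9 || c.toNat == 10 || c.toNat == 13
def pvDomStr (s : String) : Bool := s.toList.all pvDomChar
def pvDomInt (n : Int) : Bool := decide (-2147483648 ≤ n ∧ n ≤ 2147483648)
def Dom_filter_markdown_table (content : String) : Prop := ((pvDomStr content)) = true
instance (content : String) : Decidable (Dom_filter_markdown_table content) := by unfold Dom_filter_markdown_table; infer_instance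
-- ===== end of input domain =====

-- B rebuilds the output back-to-front: a reverse traversal collects each table block and
-- renders it only when its first line is reached, instead of A's forward state machine
-- carrying parsed header indices; objective: alternative, same cost.

-- ===== PORT A =====
-- s.split(sep) for a nonempty literal sep (both ports split on "\n"; A also splits lines on "|"):
-- exact via PySem.Str.split? (none only when sep = "").
def pySplit (s sep : String) : List String := (PySem.Str.split? s sep).getD []

-- A's single pass over the lines: the state is `none` (not in a table) or `some h`
-- (in a table whose header kept the column indices h).
def aLoop : List String → Option (List Int) → List String
  | [], _ => []
  | line :: rest, st =>
    match st with
    | none =>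
      if PySem.Str.startswith (PySem.Str.strip line) "|" then
        -- parse header
        let cells := ((pySplit line "|").map PySem.Str.strip).filter (fun c => c ≠ "")
        let kp := (PySem.List.enumerate cells 0).foldl
          (fun (acc : List String × List Int) p =>
            let cl := PySem.Str.strip (PySem.Str.stripChars (PySem.Str.lower p.2) "*")
            if cl = "cialfo" ∨ cl = "majorclarity" ∨ cl = "common app" then acc
            else (acc.1 ++ [p.2], acc.2 ++ [p.1])) ([], [])
        ("| " ++ PySem.Str.join " | " kp.1 ++ " |") :: aLoop rest (some kp.2)
      else
        line :: aLoop rest none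
    | some h =>
      if PySem.Str.startswith (PySem.Str.strip line) "|" then
        let cells := ((pySplit line "|").map PySem.Str.strip).filter (fun c => c ≠ "")
        (if cells.all (fun c => c = "" || c.toList.all (fun ch => ch = '-' || ch = ':' || ch = ' ')) then
          "| " ++ PySem.Str.join " | " (List.replicate h.length "---") ++ " |"
        else
          "| " ++ PySem.Str.join " | " ((h.filter (fun i => i < (cells.length : Int))).map
            (fun i => PySem.List.pyGetD cells i "")) ++ " |") :: aLoop rest (some h)
      else
        -- exit table, emit the line unchanged
        line :: aLoop rest none

def filter_markdown_table (content : String) : String :=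
  PySem.Str.join "\n" (aLoop (pySplit content "\n") none)

-- ===== PORT B =====
def bIsTableLine (line : String) : Bool :=
  PySem.Str.startswith (PySem.Str.strip line) "|"

def bCells (line : String) : List String :=
  ((pySplit line "|").map PySem.Str.strip).filter (fun c => c ≠ "")

def bRender (cs : List String) : String :=
  "| " ++ PySem.Str.join " | " cs ++ " |"

def bHeader (cells : List String) : List String × List Int :=
  (PySem.List.enumerate cells 0).foldl
    (fun (acc : List String × List Int) p =>
      let cl := PySem.Str.strip (PySem.Str.stripChars (PySem.Str.lower p.2) "*")
      if cl = "cialfo" ∨ cl = "majorclarity" ∨ cl = "common app" then acc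
      else (acc.1 ++ [p.2], acc.2 ++ [p.1])) ([], [])

def bRow (idxs : List Int) (line : String) : String :=
  let cells := bCells line
  if cells.all (fun c => c = "" || c.toList.all (fun ch => ch = '-' || ch = ':' || ch = ' ')) then
    bRender (List.replicate idxs.length "---")
  else
    bRender ((idxs.filter (fun i => i < (cells.length : Int))).map
      (fun i => PySem.List.pyGetD cells i ""))

def bRenderBlock : List String → List String
  | [] => []
  | first :: rows =>
    let kp := bHeader (bCells first)
    bRender kp.1 :: rows.map (bRow kp.2)

-- B's backward pass: Python's `for line in reversed(lines)` carrying (pending, chunks),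
-- where `pending = [line] + pending` is cons and chunks are collected back-to-front
-- (appended, then `reversed` at the end), is exactly a foldr over the lines that conses
-- the chunks front-to-back.
def bStep (line : String) (acc : List String × List (List String)) :
    List String × List (List String) :=
  if bIsTableLine line then (line :: acc.1, acc.2)
  else ([], [line] :: bRenderBlock acc.1 :: acc.2)

def filter_markdown_table_alt (content : String) : String :=
  let r := (pySplit content "\n").foldr bStep ([], [])
  PySem.Str.join "\n" ((bRenderBlock r.1 :: r.2).flatten)

-- ===== PRECONDITION & SPEC =====
def Spec_filter_markdown_table (content : String) (out : String) : Prop := out = filter_markdown_table_alt content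
instance (content : String) (out : String) : Decidable (Spec_filter_markdown_table content out) := by unfold Spec_filter_markdown_table; infer_instance

-- ===== CLAIM (what is proved, stated in full; the proofs are below) =====
def Claim_equal_filter_markdown_table : Prop := ∀ (content : String), Dom_filter_markdown_table content → Spec_filter_markdown_table content (filter_markdown_table content)

-- ===== LEMMAS AND PROOFS =====

-- Proof-side intermediate: the block decomposition of the output (a maximal run of table
-- lines rendered as one block, other lines copied). Both ports are reduced to it.
def bGo : List String → List String
  | [] => []
  | l :: ls =>
    if bIsTableLine l then
      bRenderBlock (l :: ls.takeWhile bIsTableLine) ++ bGo (ls.dropWhile bIsTableLine)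
    else
      l :: bGo ls
termination_by ls => ls.length
decreasing_by
  · simp only [List.length_cons]
    exact Nat.lt_succ_of_le (List.length_dropWhile_le _ _)
  · simp

-- Inside a table with kept indices h, A emits exactly the block's rows and then resumes
-- outside-table processing.
lemma aLoop_some (ls : List String) (h : List Int) :
    aLoop ls (some h) =
      (ls.takeWhile bIsTableLine).map (bRow h) ++ aLoop (ls.dropWhile bIsTableLine) none := by
  induction ls with
  | nil => simp [aLoop]
  | cons l ls ih =>
    by_cases hl : bIsTableLine l = true
    · have hl2 : PySem.Chars.startswith (PySem.Chars.strip l.toList) ['|'] = true := by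
        simpa [bIsTableLine] using hl
      simp [aLoop, hl, hl2, ih, bRow, bCells, bRender]
    · have hl2 : PySem.Chars.startswith (PySem.Chars.strip l.toList) ['|'] = false := by
        simpa [bIsTableLine] using hl
      simp [aLoop, hl, hl2]

-- A from the outside-table state computes the block decomposition (strong induction on
-- length, because bGo recurses on the suffix after a whole table block).
lemma aLoop_none_eq_bGo : ∀ (n : Nat) (ls : List String), ls.length ≤ n →
    aLoop ls none = bGo ls := by
  intro n
  induction n with
  | zero =>
    intro ls hls
    have : ls = [] := List.eq_nil_of_length_eq_zero (Nat.le_zero.mp hls)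
    subst this
    simp [aLoop, bGo]
  | succ n ih =>
    intro ls hls
    match ls with
    | [] => simp [aLoop, bGo]
    | l :: ls =>
      simp only [List.length_cons, Nat.add_le_add_iff_right] at hls
      by_cases hl : bIsTableLine l = true
      · have hl2 : PySem.Chars.startswith (PySem.Chars.strip l.toList) ['|'] = true := by
          simpa [bIsTableLine] using hl
        have hdrop : (ls.dropWhile bIsTableLine).length ≤ n :=
          le_trans (List.length_dropWhile_le _ _) hls
        rw [bGo, if_pos hl]
        simp [aLoop, hl2, aLoop_some, ih _ hdrop, bRenderBlock, bHeader, bCells,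
          bRender]
      · have hl2 : PySem.Chars.startswith (PySem.Chars.strip l.toList) ['|'] = false := by
          simpa [bIsTableLine] using hl
        rw [bGo, if_neg hl]
        simp [aLoop, hl2, ih ls hls]

-- Rendering the leading run as a block and recursing on the rest IS the block decomposition.
lemma bGo_eq (ls : List String) :
    bRenderBlock (ls.takeWhile bIsTableLine) ++ bGo (ls.dropWhile bIsTableLine) = bGo ls := by
  match ls with
  | [] => simp [bGo, bRenderBlock]
  | l :: ls =>
    by_cases hl : bIsTableLine l = true
    · rw [List.takeWhile_cons_of_pos hl, List.dropWhile_cons_of_pos hl, bGo, if_pos hl]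
    · rw [List.takeWhile_cons_of_neg hl, List.dropWhile_cons_of_neg hl]
      simp [bRenderBlock, bGo, hl]

-- Characterisation of B's backward fold: the pending component is the leading table run,
-- and the finished chunks flatten to the block decomposition of the rest.
lemma bFoldr_char (ls : List String) :
    (ls.foldr bStep ([], [])).1 = ls.takeWhile bIsTableLine ∧
    ((ls.foldr bStep ([], [])).2).flatten = bGo (ls.dropWhile bIsTableLine) := by
  induction ls with
  | nil => simp [bGo]
  | cons l ls ih =>
    by_cases hl : bIsTableLine l = true
    · simp only [List.foldr_cons, bStep, if_pos hl,
        List.takeWhile_cons_of_pos hl, List.dropWhile_cons_of_pos hl]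
      exact ⟨by simp [ih.1], ih.2⟩
    · simp only [List.foldr_cons, bStep, if_neg hl,
        List.takeWhile_cons_of_neg hl, List.dropWhile_cons_of_neg hl]
      refine ⟨trivial, ?_⟩
      have : bGo (l :: ls) = l :: bGo ls := by rw [bGo, if_neg hl]
      simp [this, ih.1, ih.2, bGo_eq]

lemma bAlt_eq_bGo (ls : List String) :
    (bRenderBlock (ls.foldr bStep ([], [])).1 :: (ls.foldr bStep ([], [])).2).flatten
      = bGo ls := by
  obtain ⟨h1, h2⟩ := bFoldr_char ls
  simp [h1, h2, bGo_eq]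

-- ===== VERDICT (by name: the statement is the Claim_ definition above) =====
theorem filter_markdown_table_spec : Claim_equal_filter_markdown_table := by
  intro content _
  unfold Spec_filter_markdown_table filter_markdown_table filter_markdown_table_alt
  rw [aLoop_none_eq_bGo (pySplit content "\n").length _ le_rfl, ← bAlt_eq_bGo]
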